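-- pv_equiv track=rewrite | github.com/Tarun-015/365_days_coding | Day-25/40.py | is_odd_indices_alpha_and_even_indices_digits
-- ===== SOURCE A (Python) =====
-- def is_odd_indices_alpha_and_even_indices_digits(string: str) -> bool:
--     '''
--     Given a string, check if all the odd indices are alphabets and the even indices are digits.
--
--     Note: indices starts from 0.
--
--     Arguments:
--     string: str - the input string
--
--     Return:
--     bool - True if all odd indices are alphabets and even indices are digits, else False
--     '''
--
--     for i, char in enumerate(string):
--         if i % 2 == 0:  # Even index
--             if not char.isdigit():
--                 return False
--         else:  # Odd index
--             if not char.isalpha():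
--                 return False
--     return True
-- ===== SOURCE B (Python) =====
-- def is_odd_indices_alpha_and_even_indices_digits(string: str) -> bool:
--     return (all(c.isdigit() for c in string[::2])
--             and all(c.isalpha() for c in string[1::2]))
-- ===== Notes on version B (the rewrite author's own statement) =====
-- stated objective: idiomatic
-- what changed: Replaces the single indexed loop branching on i % 2 with two parity slices string[::2] / string[1::2], each checked with all() over its characters.
import Mathlib
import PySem

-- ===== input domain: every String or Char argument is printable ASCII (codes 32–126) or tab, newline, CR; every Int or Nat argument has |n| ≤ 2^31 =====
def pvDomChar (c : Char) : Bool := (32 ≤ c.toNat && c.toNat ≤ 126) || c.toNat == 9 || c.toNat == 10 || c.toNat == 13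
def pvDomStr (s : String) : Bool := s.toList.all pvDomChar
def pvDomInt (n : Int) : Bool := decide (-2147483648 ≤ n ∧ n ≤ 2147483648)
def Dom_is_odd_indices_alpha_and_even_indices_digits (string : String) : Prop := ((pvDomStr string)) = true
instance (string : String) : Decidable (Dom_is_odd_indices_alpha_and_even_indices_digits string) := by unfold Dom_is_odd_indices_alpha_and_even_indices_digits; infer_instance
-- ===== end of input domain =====

-- B replaces A's single indexed loop (branch on i % 2) with two parity slices each
-- checked by all(); idiomatic, same cost. Equivalence proved on the whole domain.

-- ===== PORT A =====
-- the 'for i, char in enumerate(string)' loop with early 'return False'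
def pvAGo (xs : List Char) (i : Int) : Bool :=
  match xs with
  | [] => true
  | c :: rest =>
    if PySem.Int.mod i 2 == 0 then
      if !PySem.Chars.isdigit c then false else pvAGo rest (i + 1)
    else
      if !PySem.Chars.isalpha c then false else pvAGo rest (i + 1)

def is_odd_indices_alpha_and_even_indices_digits (string : String) : Bool :=
  pvAGo string.toList 0

-- ===== PORT B =====
def is_odd_indices_alpha_and_even_indices_digits_alt (string : String) : Bool :=
  match PySem.Str.slice? string none none 2, PySem.Str.slice? string (some 1) none 2 with
  | some ev, some od =>
      (ev.toList.all PySem.Chars.isdigit) && (od.toList.all PySem.Chars.isalpha)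
  | _, _ => false   -- unreachable: a step-2 slice always succeeds (totalization guard)

-- ===== PRECONDITION & SPEC =====
def Spec_is_odd_indices_alpha_and_even_indices_digits (string : String) (out : Bool) : Prop := out = is_odd_indices_alpha_and_even_indices_digits_alt string
instance (string : String) (out : Bool) : Decidable (Spec_is_odd_indices_alpha_and_even_indices_digits string out) := by unfold Spec_is_odd_indices_alpha_and_even_indices_digits; infer_instance

-- ===== CLAIM (what is proved, stated in full; the proofs are below) =====
def Claim_equal_is_odd_indices_alpha_and_even_indices_digits : Prop := ∀ (string : String), Dom_is_odd_indices_alpha_and_even_indices_digits string → Spec_is_odd_indices_alpha_and_even_indices_digits string (is_odd_indices_alpha_and_even_indices_digits string)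

-- ===== LEMMAS AND PROOFS =====

-- the elements of a list at even positions
def pvEveryOther {α : Type} : List α → List α
  | [] => []
  | [a] => [a]
  | a :: _ :: t => a :: pvEveryOther t

theorem pvEveryOther_cons {α : Type} (a : α) (l : List α) :
    pvEveryOther (a :: l) = a :: pvEveryOther l.tail := by
  cases l <;> rfl

-- the filterMap/range form inside PySem.List.slice? at step 2, start 0
theorem pv_fmod_two (j : Int) : j.fmod 2 = j % 2 := by
  rw [Int.fmod_eq_emod]; norm_num

theorem pv_filterMap_even (xs : List Char) :
    List.filterMap (fun (k : Nat) => xs[((2:Int) * (k:Int)).toNat]?)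
        (List.range ((xs.length + 1) / 2)) = pvEveryOther xs := by
  induction xs using pvEveryOther.induct with
  | case1 => simp [pvEveryOther]
  | case2 a => simp [pvEveryOther]
  | case3 a b t ih =>
    simp only [List.length_cons]
    have h2 : (t.length + 1 + 1 + 1) / 2 = (t.length + 1) / 2 + 1 := by omega
    rw [h2, List.range_succ_eq_map, List.filterMap_cons, List.filterMap_map]
    norm_num
    rw [pvEveryOther, ← ih]
    refine congrArg (a :: ·) ?_
    apply List.filterMap_congr
    intro k _
    have hk : ((2:Int) * ((k:Int) + 1)).toNat = 2 * k + 2 := by omega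
    have hk2 : ((2:Int) * ((k:Int))).toNat = 2 * k := by omega
    rw [hk, hk2]
    simp

theorem pv_slice_even (xs : List Char) :
    PySem.List.slice? xs none none 2 = some (pvEveryOther xs) := by
  simp only [PySem.List.slice?, PySem.List.sliceIndices]
  norm_num
  split_ifs with hc
  · have hcnt : ((((xs.length:Int)) + 2 - 1) / 2).toNat = (xs.length + 1) / 2 := by omega
    rw [hcnt, ← pv_filterMap_even xs]
  · have h0 : xs.length = 0 := by omega
    rcases List.eq_nil_iff_length_eq_zero.mpr h0 with rfl
    simp [pvEveryOther]

theorem pv_slice_odd (xs : List Char) :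
    PySem.List.slice? xs (some 1) none 2 = some (pvEveryOther xs.tail) := by
  simp only [PySem.List.slice?, PySem.List.sliceIndices]
  norm_num
  rcases xs with _ | ⟨a, t⟩
  · simp [pvEveryOther]
  · have hmin : min (1:Int) (((a :: t).length : Int)) = 1 := by simp
    rw [hmin]
    simp only [List.length_cons, List.tail_cons]
    split_ifs with hc
    · have hcnt : (((((t.length + 1 : Nat)):Int) - 1 + 2 - 1) / 2).toNat = (t.length + 1) / 2 := by
        push_cast; omega
      rw [hcnt, ← pv_filterMap_even t]
      apply List.filterMap_congr
      intro k _
      have hk : ((1:Int) + 2 * (k:Int)).toNat = 2 * k + 1 := by omega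
      have hk' : ((2:Int) * ((k:Int))).toNat = 2 * k := by omega
      rw [hk, hk']
      simp
    · have h0 : t.length = 0 := by omega
      rcases List.eq_nil_iff_length_eq_zero.mpr h0 with rfl
      simp [pvEveryOther]

-- parity-tracking characterisation of A's loop
theorem pvAGo_parity (xs : List Char) : ∀ i : Int,
    pvAGo xs i = if PySem.Int.mod i 2 == 0 then
        (pvEveryOther xs).all PySem.Chars.isdigit && (pvEveryOther xs.tail).all PySem.Chars.isalpha
      else
        (pvEveryOther xs).all PySem.Chars.isalpha && (pvEveryOther xs.tail).all PySem.Chars.isdigit := by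
  induction xs using pvEveryOther.induct with
  | case1 => intro i; cases h : (PySem.Int.mod i 2 == 0) <;> simp [pvAGo, pvEveryOther]
  | case2 a =>
    intro i; cases h : (PySem.Int.mod i 2 == 0) <;>
      simp only [pvAGo, pvEveryOther, h, List.tail_cons, List.all_nil,
        List.all_cons, if_true, Bool.and_true] <;>
      cases PySem.Chars.isdigit a <;> cases PySem.Chars.isalpha a <;> simp
  | case3 a b t ih =>
    intro i
    have hmod : (PySem.Int.mod (i + 1) 2 == 0) = !(PySem.Int.mod i 2 == 0) := by
      rcases Int.emod_two_eq i with h | h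
      · have h1 : (i + 1) % 2 = 1 := by omega
        simp [PySem.Int.mod, pv_fmod_two, h, h1]
      · have h1 : (i + 1) % 2 = 0 := by omega
        simp [PySem.Int.mod, pv_fmod_two, h, h1]
    have hmod2 : (PySem.Int.mod (i + 1 + 1) 2 == 0) = (PySem.Int.mod i 2 == 0) := by
      have h1 : (i + 1 + 1) % 2 = i % 2 := by omega
      simp [PySem.Int.mod, pv_fmod_two, h1]
    cases h : (PySem.Int.mod i 2 == 0) <;>
      simp only [pvAGo, h, hmod, ih (i + 1 + 1), hmod2, Bool.not_false, Bool.not_true,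
        if_true, pvEveryOther_cons, List.tail_cons, List.all_cons] <;>
      cases PySem.Chars.isdigit a <;> cases PySem.Chars.isalpha a <;>
      cases PySem.Chars.isdigit b <;> cases PySem.Chars.isalpha b <;> simp

-- ===== VERDICT (by name: the statement is the Claim_ definition above) =====
theorem is_odd_indices_alpha_and_even_indices_digits_spec : Claim_equal_is_odd_indices_alpha_and_even_indices_digits := by
  intro s _
  unfold Spec_is_odd_indices_alpha_and_even_indices_digits
  unfold is_odd_indices_alpha_and_even_indices_digits is_odd_indices_alpha_and_even_indices_digits_alt
  simp only [PySem.Str.slice?, PySem.Chars.slice?]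
  rw [pv_slice_even, pv_slice_odd, pvAGo_parity]
  simp [PySem.Int.mod, Int.fmod]
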